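-- pv_equiv track=rewrite | github.com/louiscrc/louiscrc | gitlab-activity.py | grid_week_columns
-- ===== SOURCE A (Python) =====
-- def grid_week_columns(grid):
--     """Columns used by the same packing rules as the draw loop (advance after each Sunday)."""
--     week = 0
--     max_col = 0
--     for day in grid:
--         max_col = max(max_col, week)
--         if day["weekday"] == 6:
--             week += 1
--     return max_col + 1
-- ===== SOURCE B (Python) =====
-- def grid_week_columns(grid):
--     """Columns used by the same packing rules as the draw loop (advance after each Sunday)."""
--     return sum(1 for day in grid[:-1] if day["weekday"] == 6) + 1
-- ===== Notes on version B (the rewrite author's own statement) =====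
-- stated objective: simpler
-- what changed: Replaces the stateful week/max-counter simulation with a direct closed-form count: the answer is the number of Sundays among all days but the last, plus one.
import Mathlib
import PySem

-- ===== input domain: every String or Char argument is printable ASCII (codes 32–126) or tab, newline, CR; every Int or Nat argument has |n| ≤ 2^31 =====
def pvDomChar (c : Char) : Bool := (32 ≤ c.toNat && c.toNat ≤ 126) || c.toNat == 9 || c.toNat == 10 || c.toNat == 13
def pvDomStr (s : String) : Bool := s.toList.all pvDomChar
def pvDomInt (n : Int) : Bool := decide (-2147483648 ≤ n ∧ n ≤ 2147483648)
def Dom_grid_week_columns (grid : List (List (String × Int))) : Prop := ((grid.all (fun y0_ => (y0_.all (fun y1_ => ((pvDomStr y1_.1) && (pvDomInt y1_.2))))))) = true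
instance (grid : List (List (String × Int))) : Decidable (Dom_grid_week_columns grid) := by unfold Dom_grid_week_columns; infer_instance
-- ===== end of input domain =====

-- ===== PORT A =====
-- B replaces A's stateful week/max-counter loop by a direct count of Sundays in grid[:-1] plus one (simpler).
-- Port of A: fold threading the (week, max_col) state; day["weekday"] looked up with Dict.get?
-- (Pre_ guarantees the key is present, matching Python's KeyError-free runs).
def grid_week_columns (grid : List (List (String × Int))) : Int :=
  let st := grid.foldl (fun (s : Int × Int) day =>
    let mc := max s.2 s.1
    if (PySem.Dict.get? (PySem.Dict.mk day) "weekday").getD 0 == 6 then (s.1 + 1, mc) else (s.1, mc)) (0, 0)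
  st.2 + 1

-- ===== PORT B =====
def grid_week_columns_alt (grid : List (List (String × Int))) : Int :=
  ((PySem.List.slice grid none (some (-1))).countP
    (fun day => (PySem.Dict.get? (PySem.Dict.mk day) "weekday").getD 0 == 6) : Int) + 1

-- ===== PRECONDITION & SPEC =====
-- Pre_ excludes grids containing a day without a "weekday" key, on which the Python A (and B) raise KeyError.
def Pre_grid_week_columns (grid : List (List (String × Int))) : Prop :=
  (grid.all (fun day => (PySem.Dict.get? (PySem.Dict.mk day) "weekday").isSome)) = true
instance (grid : List (List (String × Int))) : Decidable (Pre_grid_week_columns grid) := by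
  unfold Pre_grid_week_columns; infer_instance
def pvWitness_grid_week_columns : (List (List (String × Int))) :=
  [[("weekday", 6)], [("weekday", 0)]]
def Spec_grid_week_columns (grid : List (List (String × Int))) (out : Int) : Prop := out = grid_week_columns_alt grid
instance (grid : List (List (String × Int))) (out : Int) : Decidable (Spec_grid_week_columns grid out) := by unfold Spec_grid_week_columns; infer_instance

-- ===== CLAIM (what is proved, stated in full; the proofs are below) =====
def Claim_equal_grid_week_columns : Prop := ∀ (grid : List (List (String × Int))), Dom_grid_week_columns grid → Pre_grid_week_columns grid → Spec_grid_week_columns grid (grid_week_columns grid)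

-- ===== LEMMAS AND PROOFS =====

-- A's loop, started at (w, m) with m ≤ w, ends with max_col = m on the empty grid
-- and w + (#Sundays among all but the last day) otherwise.
theorem gwc_loop (grid : List (List (String × Int))) :
    ∀ (w m : Int), m ≤ w →
    (grid.foldl (fun (s : Int × Int) day =>
      let mc := max s.2 s.1
      if (PySem.Dict.get? (PySem.Dict.mk day) "weekday").getD 0 == 6 then (s.1 + 1, mc) else (s.1, mc)) (w, m)).2
    = if grid = [] then m
      else w + (grid.dropLast.countP
        (fun day => (PySem.Dict.get? (PySem.Dict.mk day) "weekday").getD 0 == 6) : Int) := by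
  induction grid with
  | nil => intro w m _; simp
  | cons d rest ih =>
    intro w m hmw
    by_cases hp : ((PySem.Dict.get? (PySem.Dict.mk d) "weekday").getD 0 == 6) = true
    · simp only [List.foldl_cons, hp, if_pos, max_eq_right hmw]
      rw [ih (w + 1) w (by omega)]
      cases rest with
      | nil => simp
      | cons e t =>
        simp only [List.dropLast_cons₂, List.countP_cons, hp]
        push_cast
        ring
    · simp only [List.foldl_cons, hp, if_neg, max_eq_right hmw, Bool.false_eq_true,
        not_false_eq_true]
      rw [ih w w le_rfl]
      cases rest with
      | nil => simp
      | cons e t =>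
        simp [List.dropLast_cons₂, hp]

-- ===== VERDICT (by name: the statement is the Claim_ definition above) =====
theorem grid_week_columns_spec : Claim_equal_grid_week_columns := by
  intro grid _ _
  unfold Spec_grid_week_columns grid_week_columns grid_week_columns_alt
  rw [PySem.List.slice_to_neg_one]
  simp only []
  rw [gwc_loop grid 0 0 le_rfl]
  cases grid with
  | nil => simp
  | cons d rest => simp
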